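-- pv_equiv track=rewrite | github.com/EbookFoundation/free-programming-books | venv/lib/python3.9/site-packages/pip/_vendor/packaging/metadata.py | _parse_project_urls
-- ===== SOURCE A (Python) =====
-- def _parse_project_urls(data: list[str]) -> dict[str, str]:
--     """Parse a list of label/URL string pairings separated by a comma."""
--     urls = {}
--     for pair in data:
--         # Our logic is slightly tricky here as we want to try and do
--         # *something* reasonable with malformed data.
--         #
--         # The main thing that we have to worry about, is data that does
--         # not have a ',' at all to split the label from the Value. There
--         # isn't a singular right answer here, and we will fail validation
--         # later on (if the caller is validating) so it doesn't *really*
--         # matter, but since the missing value has to be an empty str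
--         # and our return value is dict[str, str], if we let the key
--         # be the missing value, then they'd have multiple '' values that
--         # overwrite each other in a accumulating dict.
--         #
--         # The other potentional issue is that it's possible to have the
--         # same label multiple times in the metadata, with no solid "right"
--         # answer with what to do in that case. As such, we'll do the only
--         # thing we can, which is treat the field as unparseable and add it
--         # to our list of unparsed fields.
--         parts = [p.strip() for p in pair.split(",", 1)]
--         parts.extend([""] * (max(0, 2 - len(parts))))  # Ensure 2 items
--
--         # TODO: The spec doesn't say anything about if the keys should be
--         #       considered case sensitive or not... logically they should
--         #       be case-preserving and case-insensitive, but doing that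
--         #       would open up more cases where we might have duplicate
--         #       entries.
--         label, url = parts
--         if label in urls:
--             # The label already exists in our set of urls, so this field
--             # is unparseable, and we can just add the whole thing to our
--             # unparseable data and stop processing it.
--             raise KeyError("duplicate labels in project urls")
--         urls[label] = url
--
--     return urls
-- ===== SOURCE B (Python) =====
-- def _parse_project_urls(data):
--     """Parse all pairs first, then detect duplicate labels by sorting and
--     scanning adjacent entries, then build the dict in one go."""
--     pairs = []
--     for pair in data:
--         parts = pair.split(",", 1)
--         pairs.append((parts[0].strip(), parts[1].strip() if len(parts) > 1 else ""))
--     labels = sorted(label for label, _ in pairs)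
--     if any(x == y for x, y in zip(labels, labels[1:])):
--         raise KeyError("duplicate labels in project urls")
--     return dict(pairs)
-- ===== Notes on version B (the rewrite author's own statement) =====
-- stated objective: alternative
-- what changed: Replaces A's single interleaved loop (incremental dict build with an in-loop hash-membership duplicate test, raising on first duplicate) with staged passes whose duplicate detection uses a different algorithm: parse all pairs, sort the labels and scan adjacent entries for a repeat (comparison-based, O(n log n)) instead of hashing, then build the dict at the end with dict(pairs).
import Mathlib
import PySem

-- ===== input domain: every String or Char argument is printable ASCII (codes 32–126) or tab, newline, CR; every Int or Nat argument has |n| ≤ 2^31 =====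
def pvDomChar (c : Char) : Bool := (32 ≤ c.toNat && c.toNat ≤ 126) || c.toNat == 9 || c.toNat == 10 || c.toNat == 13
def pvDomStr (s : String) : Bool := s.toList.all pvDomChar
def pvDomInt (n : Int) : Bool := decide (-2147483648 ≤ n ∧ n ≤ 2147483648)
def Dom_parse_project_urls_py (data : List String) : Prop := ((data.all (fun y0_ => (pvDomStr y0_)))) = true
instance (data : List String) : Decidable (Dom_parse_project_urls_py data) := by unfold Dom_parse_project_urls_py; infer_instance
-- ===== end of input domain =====

-- B stages the work (parse all pairs, then detect duplicate labels by SORTING the labels and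
-- scanning adjacent entries, then build the dict once) instead of A's single loop with an
-- in-loop hash-membership test and incremental dict build (objective: alternative algorithm
-- for duplicate detection; not claimed faster).

-- ===== PORT A =====
-- A's loop with `raise KeyError` is modelled as a fold over Option (none = the exception);
-- the top-level `.getD` only unwraps on inputs where the loop completed (Pre_ excludes the raise).
def parse_project_urls_py (data : List String) : List (String × String) :=
  ((data.foldl (fun acc pair => acc.bind (fun urls =>
      let parts := ((PySem.Str.splitMax? pair "," 1).getD []).map PySem.Str.strip
      let parts2 := parts ++ List.replicate (2 - parts.length) ""   -- Ensure 2 items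
      let label := parts2.headD ""
      let url := parts2[1]?.getD ""
      if urls.contains label then none else some (urls.insert label url)))
    (some (PySem.Dict.empty (κ := String) (ν := String)))).getD PySem.Dict.empty).items

-- ===== PORT B =====
-- pass 1 body: parse one string to a (label, url) pair (split, strip, default url "")
def pvParseB (pair : String) : String × String :=
  let parts := (PySem.Str.splitMax? pair "," 1).getD []
  (PySem.Str.strip (parts.headD ""),
   if 1 < parts.length then PySem.Str.strip (parts[1]?.getD "") else "")

def parse_project_urls_py_alt (data : List String) : List (String × String) :=
  let pairs := data.map pvParseB
  -- pass 2: sort the labels and scan adjacent entries for a repeat (raise modelled as []; outside Pre_)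
  let labels := PySem.List.sorted (pairs.map Prod.fst) (fun x => x) false
  if (labels.zip (PySem.List.slice labels (some 1) none)).any (fun p => p.1 == p.2) then []
  -- pass 3: dict(pairs)
  else (pairs.foldl (fun d p => d.insert p.1 p.2) PySem.Dict.empty).items

-- ===== PRECONDITION & SPEC =====
-- Pre_ excludes exactly the inputs with a repeated (stripped) label, on which A raises
-- KeyError('duplicate labels in project urls') — and B raises the identical KeyError.
def Pre_parse_project_urls_py (data : List String) : Prop :=
  (data.map (fun pair =>
    (((PySem.Str.splitMax? pair "," 1).getD []).map PySem.Str.strip).headD "")).Nodup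
instance (data : List String) : Decidable (Pre_parse_project_urls_py data) := by
  unfold Pre_parse_project_urls_py; infer_instance

def pvWitness_parse_project_urls_py : List String := ["Home, https://example.com", "Docs", " Bug Tracker ,https://bugs.example.com"]

def Spec_parse_project_urls_py (data : List String) (out : List (String × String)) : Prop := out = parse_project_urls_py_alt data
instance (data : List String) (out : List (String × String)) : Decidable (Spec_parse_project_urls_py data out) := by unfold Spec_parse_project_urls_py; infer_instance

-- ===== CLAIM (what is proved, stated in full; the proofs are below) =====
def Claim_equal_parse_project_urls_py : Prop := ∀ (data : List String), Dom_parse_project_urls_py data → Pre_parse_project_urls_py data → Spec_parse_project_urls_py data (parse_project_urls_py data)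

-- ===== LEMMAS AND PROOFS =====

-- the label B's parse extracts, as a function
def pvLab (pair : String) : String := (pvParseB pair).1

-- A's in-loop label/url equal B's parse of the same string (case split on the ≤2 split pieces)
theorem pvStep_eq_parse (pair : String) :
    (let parts := ((PySem.Str.splitMax? pair "," 1).getD []).map PySem.Str.strip
     let parts2 := parts ++ List.replicate (2 - parts.length) ""
     ((parts2.headD "" : String), (parts2[1]?.getD "" : String))) = pvParseB pair := by
  unfold pvParseB
  rcases h : (PySem.Str.splitMax? pair "," 1).getD [] with _ | ⟨a, _ | ⟨b, t⟩⟩ <;>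
    simp [List.replicate, PySem.Str.strip, PySem.Chars.strip, PySem.Chars.lstrip, PySem.Chars.rstrip]

-- A's Option-fold completes and equals the plain insert-fold when the labels are fresh and distinct
theorem pvLoopA (data : List String) (d : PySem.Dict String String)
    (hfresh : ∀ s ∈ data, d.contains (pvLab s) = false)
    (hnd : (data.map pvLab).Nodup) :
    data.foldl (fun acc pair => acc.bind (fun urls =>
      let parts := ((PySem.Str.splitMax? pair "," 1).getD []).map PySem.Str.strip
      let parts2 := parts ++ List.replicate (2 - parts.length) ""
      let label := parts2.headD ""
      let url := parts2[1]?.getD ""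
      if urls.contains label then none else some (urls.insert label url))) (some d)
    = some (data.foldl (fun d p => d.insert (pvParseB p).1 (pvParseB p).2) d) := by
  induction data generalizing d with
  | nil => rfl
  | cons p rest ih =>
    simp only [List.foldl_cons, Option.bind_some]
    have hp := pvStep_eq_parse p
    simp only [] at hp
    have h1 : (((((PySem.Str.splitMax? p "," 1).getD []).map PySem.Str.strip) ++
        List.replicate (2 - (((PySem.Str.splitMax? p "," 1).getD []).map PySem.Str.strip).length) "").headD "")
        = (pvParseB p).1 := congrArg Prod.fst hp
    have h2 : ((((((PySem.Str.splitMax? p "," 1).getD []).map PySem.Str.strip) ++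
        List.replicate (2 - (((PySem.Str.splitMax? p "," 1).getD []).map PySem.Str.strip).length) "")[1]?).getD "")
        = (pvParseB p).2 := congrArg Prod.snd hp
    rw [h1, h2]
    have hc : d.contains (pvParseB p).1 = false := by
      have := hfresh p (List.mem_cons_self)
      simpa [pvLab] using this
    rw [hc]
    simp only [Bool.false_eq_true, if_false]
    simp only [List.map_cons, List.nodup_cons] at hnd
    exact ih (d.insert (pvParseB p).1 (pvParseB p).2)
      (fun s hs => by
        rw [PySem.Dict.contains_insert]
        have hne : pvLab s ≠ pvLab p := fun h => hnd.1 (h ▸ List.mem_map_of_mem hs)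
        have hf := hfresh s (List.mem_cons_of_mem _ hs)
        simp only [Bool.or_eq_false_iff, beq_eq_false_iff_ne]
        exact ⟨hne, hf⟩)
      hnd.2

-- a duplicate-free list has no equal adjacent entries
theorem pvAdjOfNodup (l : List String) (h : l.Nodup) :
    (l.zip l.tail).any (fun p => p.1 == p.2) = false := by
  induction l with
  | nil => rfl
  | cons a t ih =>
    rcases t with _ | ⟨b, u⟩
    · rfl
    · rcases List.nodup_cons.mp h with ⟨ha, ht⟩
      simp only [List.tail_cons, List.zip_cons_cons, List.any_cons, Bool.or_eq_false_iff]
      refine ⟨?_, ih ht⟩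
      simp only [beq_eq_false_iff_ne]
      exact fun hab => ha (hab ▸ List.mem_cons_self)

-- ===== VERDICT (by name: the statement is the Claim_ definition above) =====
theorem parse_project_urls_py_spec : Claim_equal_parse_project_urls_py := by
  intro data _ hpre
  have hlab : (data.map (fun pair =>
      (((PySem.Str.splitMax? pair "," 1).getD []).map PySem.Str.strip).headD "")) = data.map pvLab := by
    apply List.map_congr_left
    intro s _
    have := congrArg Prod.fst (pvStep_eq_parse s)
    simp only [pvLab]
    rw [← this]
    rcases ((PySem.Str.splitMax? s "," 1).getD []).map PySem.Str.strip with _ | ⟨a, t⟩ <;> simp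
  unfold Pre_parse_project_urls_py at hpre
  rw [hlab] at hpre
  unfold Spec_parse_project_urls_py parse_project_urls_py parse_project_urls_py_alt
  rw [pvLoopA data PySem.Dict.empty (fun s _ => by simp [PySem.Dict.contains, PySem.Dict.empty]) hpre]
  have hmap : (data.map pvParseB).map Prod.fst = data.map pvLab := by
    simp [pvLab, Function.comp]
  have hsortnd : (PySem.List.sorted (data.map pvLab) (fun x => x) false).Nodup :=
    (PySem.List.sorted_perm (data.map pvLab) (fun x => x) false).nodup_iff.mpr hpre
  simp only [Option.getD_some, hmap, PySem.List.slice_from_one,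
    pvAdjOfNodup _ hsortnd, Bool.false_eq_true, if_false, List.foldl_map]
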